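-- pv_equiv track=rewrite | github.com/swombat/model-personality-drift-v2 | scripts/generate_model_stubs.py | cell_to_model
-- ===== SOURCE A (Python) =====
-- MODELS = [
--     # Anthropic
--     "opus-3", "opus-4-0", "opus-4-1", "opus-4-5", "opus-4-6", "opus-4-7", "opus",
--     "sonnet-4-0", "sonnet-4-5", "sonnet-4-6", "sonnet",
--     "haiku-4-5",  # v1-only
--     # OpenAI
--     "gpt-3-5-turbo", "gpt-4", "gpt-4-1", "gpt-4-turbo", "gpt-4o",  # v1-era
--     "gpt-5", "gpt-5-1", "gpt-5-2", "gpt-5-3", "gpt-5-4", "gpt-5-5", "gpt-5-5-pro",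
--     "gpt-5-codex", "gpt-5-1-codex", "gpt-5-2-codex", "gpt-5-3-codex",
--     # Google
--     "gemini-2-5-pro", "gemini-3-1-pro",
--     # xAI
--     "grok-3", "grok-4", "grok-4-2", "grok-4-20", "grok-4-3",
--     # DeepSeek
--     "deepseek-chat", "deepseek-r1", "deepseek-v3", "deepseek-v3-0324",  # v1-era
--     "deepseek-v3-2", "deepseek-v4-pro",
--     # Z.ai (GLM)
--     "glm-4-5", "glm-4-6", "glm-4-6-coding", "glm-4-7", "glm-5-1", "glm-5-1-coding",
--     # MiniMax
--     "minimax-m2", "minimax-m2-7",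
--     # Moonshot (Kimi)
--     "kimi-k2",  # v1-only base predecessor
--     "kimi-k2-0905", "kimi-k2-5", "kimi-k2-6", "kimi-k2-thinking", "kimi-coding",
--     # Alibaba (Qwen)
--     "qwen3-6-plus", "qwen3-coder-plus",
-- ]
--
-- V1_BARE_REMAP = {
--     "opus": "opus-4-6",
--     "sonnet": "sonnet-4-6",
--     "haiku": "haiku-4-5",
-- }
--
-- def cell_to_model(cell_name: str) -> str | None:
--     """Map a freeflow cell label to its model name.
--
--     Handles three label patterns:
--     - v2 freeflow: `freeflow_opus-4-6-direct-16k` → `opus-4-6`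
--     - v1 freeflow (in tsv): `v1_opus-3` → `opus-3`
--     - v1 freeflow bare-label: `v1_opus` → `opus-4-6` (via V1_BARE_REMAP)
--
--     Longest-prefix wins for overlap cases (gpt-5-1 vs gpt-5-1-codex etc.).
--     """
--     body = cell_name
--     if body.startswith("freeflow_"):
--         body = body[len("freeflow_"):]
--     if body.startswith("v1_"):
--         body = body[len("v1_"):]
--     if body in V1_BARE_REMAP:
--         return V1_BARE_REMAP[body]
--     candidates = [m for m in MODELS if body.startswith(m + "-") or body == m]
--     if not candidates:
--         return None
--     return max(candidates, key=len)
-- ===== SOURCE B (Python) =====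
-- MODELS = [
--     # Anthropic
--     "opus-3", "opus-4-0", "opus-4-1", "opus-4-5", "opus-4-6", "opus-4-7", "opus",
--     "sonnet-4-0", "sonnet-4-5", "sonnet-4-6", "sonnet",
--     "haiku-4-5",  # v1-only
--     # OpenAI
--     "gpt-3-5-turbo", "gpt-4", "gpt-4-1", "gpt-4-turbo", "gpt-4o",  # v1-era
--     "gpt-5", "gpt-5-1", "gpt-5-2", "gpt-5-3", "gpt-5-4", "gpt-5-5", "gpt-5-5-pro",
--     "gpt-5-codex", "gpt-5-1-codex", "gpt-5-2-codex", "gpt-5-3-codex",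
--     # Google
--     "gemini-2-5-pro", "gemini-3-1-pro",
--     # xAI
--     "grok-3", "grok-4", "grok-4-2", "grok-4-20", "grok-4-3",
--     # DeepSeek
--     "deepseek-chat", "deepseek-r1", "deepseek-v3", "deepseek-v3-0324",  # v1-era
--     "deepseek-v3-2", "deepseek-v4-pro",
--     # Z.ai (GLM)
--     "glm-4-5", "glm-4-6", "glm-4-6-coding", "glm-4-7", "glm-5-1", "glm-5-1-coding",
--     # MiniMax
--     "minimax-m2", "minimax-m2-7",
--     # Moonshot (Kimi)
--     "kimi-k2",  # v1-only base predecessor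
--     "kimi-k2-0905", "kimi-k2-5", "kimi-k2-6", "kimi-k2-thinking", "kimi-coding",
--     # Alibaba (Qwen)
--     "qwen3-6-plus", "qwen3-coder-plus",
-- ]
--
-- V1_BARE_REMAP = {
--     "opus": "opus-4-6",
--     "sonnet": "sonnet-4-6",
--     "haiku": "haiku-4-5",
-- }
--
-- _MODEL_SET = set(MODELS)
-- _MAX_LEN = max(len(m) for m in MODELS)
--
-- def cell_to_model(cell_name: str) -> str | None:
--     """Longest-prefix match via boundary prefixes of the label and a model set."""
--     body = cell_name
--     if body.startswith("freeflow_"):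
--         body = body[len("freeflow_"):]
--     if body.startswith("v1_"):
--         body = body[len("v1_"):]
--     if body in V1_BARE_REMAP:
--         return V1_BARE_REMAP[body]
--     # scan boundary prefixes of body, longest first; models are short, so cap the start
--     for i in range(min(len(body), _MAX_LEN), -1, -1):
--         if (i == len(body) or body[i] == "-") and body[:i] in _MODEL_SET:
--             return body[:i]
--     return None
-- ===== Notes on version B (the rewrite author's own statement) =====
-- stated objective: alternative
-- what changed: Instead of filtering the whole MODELS list by prefix tests and taking the max-by-length candidate, B walks the hyphen-boundary prefixes of the label from longest (capped at the maximum model length) to shortest and returns the first one found in a precomputed set of MODELS.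
import Mathlib
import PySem

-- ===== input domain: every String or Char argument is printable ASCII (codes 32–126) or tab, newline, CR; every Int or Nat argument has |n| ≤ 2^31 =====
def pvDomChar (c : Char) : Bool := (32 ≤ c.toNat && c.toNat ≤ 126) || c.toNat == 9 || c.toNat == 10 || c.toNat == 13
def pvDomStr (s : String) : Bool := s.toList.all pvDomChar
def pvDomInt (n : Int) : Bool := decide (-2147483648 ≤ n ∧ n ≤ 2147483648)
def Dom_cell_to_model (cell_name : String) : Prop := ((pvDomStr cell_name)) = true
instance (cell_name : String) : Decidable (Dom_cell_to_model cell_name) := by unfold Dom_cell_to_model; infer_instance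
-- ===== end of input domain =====

-- B replaces A's scan of the whole MODELS list (filter by prefix, then max by length) with a
-- longest-first walk over the '-'-boundary prefixes of the label, checked against MODELS as a set.

-- shared module data (same constants in both Python files)
def MODELS : List String :=
  ["opus-3", "opus-4-0", "opus-4-1", "opus-4-5", "opus-4-6", "opus-4-7", "opus",
   "sonnet-4-0", "sonnet-4-5", "sonnet-4-6", "sonnet",
   "haiku-4-5",
   "gpt-3-5-turbo", "gpt-4", "gpt-4-1", "gpt-4-turbo", "gpt-4o",
   "gpt-5", "gpt-5-1", "gpt-5-2", "gpt-5-3", "gpt-5-4", "gpt-5-5", "gpt-5-5-pro",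
   "gpt-5-codex", "gpt-5-1-codex", "gpt-5-2-codex", "gpt-5-3-codex",
   "gemini-2-5-pro", "gemini-3-1-pro",
   "grok-3", "grok-4", "grok-4-2", "grok-4-20", "grok-4-3",
   "deepseek-chat", "deepseek-r1", "deepseek-v3", "deepseek-v3-0324",
   "deepseek-v3-2", "deepseek-v4-pro",
   "glm-4-5", "glm-4-6", "glm-4-6-coding", "glm-4-7", "glm-5-1", "glm-5-1-coding",
   "minimax-m2", "minimax-m2-7",
   "kimi-k2",
   "kimi-k2-0905", "kimi-k2-5", "kimi-k2-6", "kimi-k2-thinking", "kimi-coding",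
   "qwen3-6-plus", "qwen3-coder-plus"]

def V1_BARE_REMAP : PySem.Dict String String :=
  PySem.Dict.ofList [("opus", "opus-4-6"), ("sonnet", "sonnet-4-6"), ("haiku", "haiku-4-5")]

-- ===== PORT A =====
def cell_to_model (cell_name : String) : Option String :=
  let body := cell_name
  let body := if PySem.Str.startswith body "freeflow_"
              then PySem.Str.slice body (some (PySem.Str.len "freeflow_")) none else body
  let body := if PySem.Str.startswith body "v1_"
              then PySem.Str.slice body (some (PySem.Str.len "v1_")) none else body
  if V1_BARE_REMAP.contains body then V1_BARE_REMAP.get? body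
  else
    let candidates := MODELS.filter (fun m => PySem.Str.startswith body (m ++ "-") || body == m)
    if candidates = [] then none
    else PySem.List.max? candidates (fun m => PySem.Str.len m)   -- max on a nonempty list returns its value

-- ===== PORT B =====
def MODEL_SET : PySem.Set String := PySem.Set.ofList MODELS

def MAX_LEN : Int := PySem.List.maxD (MODELS.map (fun m => PySem.Str.len m)) (fun x => x) 0

-- Source B's boundary-prefix test: (i == len(body) or body[i] == '-') and body[:i] in _MODEL_SET
def altGood (body : String) (i : Nat) : Bool :=
  (decide ((i : Int) = PySem.Str.len body) || (PySem.Str.pyGet? body (i : Int) == some '-'))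
    && PySem.Set.contains MODEL_SET (PySem.Str.slice body none (some (i : Int)))

-- Source B's loop 'for i in range(start, -1, -1)' as the obvious countdown recursion
def altScan (body : String) : Nat → Option String
  | 0 => if altGood body 0 then some (PySem.Str.slice body none (some ((0 : Nat) : Int))) else none
  | i + 1 => if altGood body (i + 1) then some (PySem.Str.slice body none (some ((i + 1 : Nat) : Int)))
             else altScan body i

def cell_to_model_alt (cell_name : String) : Option String :=
  let body := cell_name
  let body := if PySem.Str.startswith body "freeflow_"
              then PySem.Str.slice body (some (PySem.Str.len "freeflow_")) none else body
  let body := if PySem.Str.startswith body "v1_"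
              then PySem.Str.slice body (some (PySem.Str.len "v1_")) none else body
  if V1_BARE_REMAP.contains body then V1_BARE_REMAP.get? body
  else altScan body (min (PySem.Str.len body) MAX_LEN).toNat

-- ===== PRECONDITION & SPEC =====
def Spec_cell_to_model (cell_name : String) (out : Option String) : Prop := out = cell_to_model_alt cell_name
instance (cell_name : String) (out : Option String) : Decidable (Spec_cell_to_model cell_name out) := by unfold Spec_cell_to_model; infer_instance

-- ===== CLAIM (what is proved, stated in full; the proofs are below) =====
def Claim_equal_cell_to_model : Prop := ∀ (cell_name : String), Dom_cell_to_model cell_name → Spec_cell_to_model cell_name (cell_to_model cell_name)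
-- snoc-prefix characterisation
lemma prefix_snoc_iff (xs : List Char) (c : Char) (ys : List Char) :
    xs ++ [c] <+: ys ↔ xs <+: ys ∧ ys[xs.length]? = some c := by
  constructor
  · rintro ⟨t, rfl⟩
    refine ⟨⟨c :: t, by simp⟩, ?_⟩
    simp
  · rintro ⟨⟨t, rfl⟩, h⟩
    rw [List.getElem?_append_right (by omega)] at h
    simp at h
    cases t with
    | nil => simp at h
    | cons d t' => simp at h; exact ⟨t', by simp [h]⟩

lemma modelsLen : ∀ m ∈ MODELS, m.toList.length ≤ 16 := by decide

lemma maxlen16 : MAX_LEN = 16 := by decide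

-- the candidate predicate of A, characterised by boundary prefixes
lemma candA_iff (body m : String) :
    ((PySem.Str.startswith body (m ++ "-") || body == m) = true)
    ↔ (body.toList.take m.toList.length = m.toList ∧
       (m.toList.length = body.toList.length ∨ body.toList[m.toList.length]? = some '-')) := by
  rw [Bool.or_eq_true, PySem.Str.startswith_eq, PySem.Chars.startswith_iff, String.toList_append,
      beq_iff_eq]
  rw [show ("-" : String).toList = ['-'] from rfl, prefix_snoc_iff, List.prefix_iff_eq_take]
  constructor
  · rintro (⟨h1, h2⟩ | rfl)
    · exact ⟨h1.symm, Or.inr h2⟩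
    · exact ⟨by simp, Or.inl rfl⟩
  · rintro ⟨h1, h2 | h2⟩
    · right
      have : body.toList = m.toList := by rw [← h1, h2]; simp
      exact String.toList_inj.mp this.symm ▸ rfl
    · exact Or.inl ⟨h1.symm, h2⟩

-- altGood characterised
lemma mem_MODEL_SET (x : String) : x ∈ MODEL_SET ↔ x ∈ MODELS := by
  unfold MODEL_SET; exact PySem.Set.mem_ofList _ _

lemma altGood_iff (body : String) (i : Nat) :
    altGood body i = true ↔
      ((i = body.toList.length ∨ body.toList[i]? = some '-') ∧
       PySem.Str.slice body none (some (i : Int)) ∈ MODELS) := by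
  unfold altGood
  rw [Bool.and_eq_true, Bool.or_eq_true, PySem.Str.len_eq]
  constructor
  · rintro ⟨h1, h2⟩
    refine ⟨?_, ?_⟩
    · rcases h1 with h | h
      · left; exact_mod_cast of_decide_eq_true h
      · right; simpa using h
    · have := (PySem.Set.contains_iff _ _).mp h2
      rwa [mem_MODEL_SET] at this
  · rintro ⟨h1, h2⟩
    refine ⟨?_, ?_⟩
    · rcases h1 with h | h
      · left; exact decide_eq_true (by exact_mod_cast h)
      · right; simpa using h
    · exact (PySem.Set.contains_iff _ _).mpr ((mem_MODEL_SET _).mpr h2)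

lemma toList_slice_take (body : String) (i : Nat) :
    (PySem.Str.slice body none (some (i : Int))).toList = body.toList.take i := by
  rw [PySem.Str.toList_slice, PySem.Chars.slice_eq_listSlice, PySem.List.slice_to_natCast]

-- loop lemmas
lemma altScan_none (body : String) (s : Nat) (h : ∀ j ≤ s, altGood body j = false) :
    altScan body s = none := by
  induction s with
  | zero => simp [altScan, h 0 le_rfl]
  | succ n ih => simp [altScan, h (n+1) le_rfl]; exact ih fun j hj => h j (by omega)

lemma altScan_some (body : String) (s i : Nat) (hg : altGood body i = true) (his : i ≤ s)
    (hmax : ∀ j, i < j → j ≤ s → altGood body j = false) :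
    altScan body s = some (PySem.Str.slice body none (some (i : Int))) := by
  induction s with
  | zero =>
    have : i = 0 := by omega
    subst this
    simp [altScan, hg]
  | succ n ih =>
    by_cases h : i = n + 1
    · subst h; simp [altScan, hg]
    · have hle : i ≤ n := by omega
      have : altGood body (n + 1) = false := hmax (n+1) (by omega) le_rfl
      simp [altScan, this]
      exact ih hle fun j hj hjn => hmax j hj (by omega)

-- the main body-level equality
lemma main_eq (body : String) :
    (let candidates := MODELS.filter (fun m => PySem.Str.startswith body (m ++ "-") || body == m)
     if candidates = [] then none
     else PySem.List.max? candidates (fun m => PySem.Str.len m))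
    = altScan body (min (PySem.Str.len body) MAX_LEN).toNat := by
  set cand := MODELS.filter (fun m => PySem.Str.startswith body (m ++ "-") || body == m) with hcand
  have hstart : (min (PySem.Str.len body) MAX_LEN).toNat = min body.toList.length 16 := by
    simp only [maxlen16, PySem.Str.len_eq]; omega
  rw [hstart]
  by_cases hc : cand = []
  · simp only [hc, if_pos]
    symm
    apply altScan_none
    intro j hj
    by_contra hbad
    rw [Bool.not_eq_false, altGood_iff] at hbad
    obtain ⟨hb, hmem⟩ := hbad
    set p := PySem.Str.slice body none (some (j : Int)) with hp
    have hpt : p.toList = body.toList.take j := toList_slice_take body j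
    have hjlen : j ≤ body.toList.length := le_trans hj (by omega)
    have hplen : p.toList.length = j := by rw [hpt, List.length_take]; omega
    have : (PySem.Str.startswith body (p ++ "-") || body == p) = true := by
      rw [candA_iff, hplen, hpt]
      exact ⟨rfl, hb⟩
    have : p ∈ cand := by rw [hcand, List.mem_filter]; exact ⟨hmem, this⟩
    rw [hc] at this; simp at this
  · simp only [if_neg hc]
    obtain ⟨m, hm⟩ : ∃ m, PySem.List.max? cand (fun m => PySem.Str.len m) = some m := by
      cases h : PySem.List.max? cand (fun m => PySem.Str.len m) with
      | none => exact absurd ((PySem.List.max?_eq_none_iff _ _).mp h) hc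
      | some m => exact ⟨m, rfl⟩
    rw [hm]
    have hmem := PySem.List.max?_mem hm
    have hmax := PySem.List.max?_isMax hm
    rw [hcand, List.mem_filter] at hmem
    obtain ⟨hmM, hmp⟩ := hmem
    rw [candA_iff] at hmp
    obtain ⟨htake, hb⟩ := hmp
    set i := m.toList.length with hi
    have hilen : i ≤ body.toList.length := by
      have := congrArg List.length htake
      rw [List.length_take] at this
      omega
    have hgood : altGood body i = true := by
      rw [altGood_iff]
      refine ⟨hb.imp id id, ?_⟩
      have : PySem.Str.slice body none (some (i : Int)) = m :=
        String.toList_inj.mp (by rw [toList_slice_take, htake])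
      rwa [this]
    have hres : PySem.Str.slice body none (some (i : Int)) = m :=
      String.toList_inj.mp (by rw [toList_slice_take, htake])
    symm
    rw [← hres]
    apply altScan_some body _ i hgood
    · have := modelsLen m hmM; omega
    · intro j hj hjs
      by_contra hbad
      rw [Bool.not_eq_false, altGood_iff] at hbad
      obtain ⟨hbj, hmemj⟩ := hbad
      set p := PySem.Str.slice body none (some (j : Int)) with hp
      have hpt : p.toList = body.toList.take j := toList_slice_take body j
      have hjlen : j ≤ body.toList.length := le_trans hjs (by omega)
      have hplen : p.toList.length = j := by rw [hpt, List.length_take]; omega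
      have hpc : p ∈ cand := by
        rw [hcand, List.mem_filter]
        refine ⟨hmemj, ?_⟩
        rw [candA_iff, hplen, hpt]
        exact ⟨rfl, hbj⟩
      have := hmax p hpc
      rw [PySem.Str.len_eq, PySem.Str.len_eq, hplen] at this
      omega

lemma branch_eq (body : String) :
    (if V1_BARE_REMAP.contains body then V1_BARE_REMAP.get? body
     else
       let candidates := MODELS.filter (fun m => PySem.Str.startswith body (m ++ "-") || body == m)
       if candidates = [] then none
       else PySem.List.max? candidates (fun m => PySem.Str.len m))
    = (if V1_BARE_REMAP.contains body then V1_BARE_REMAP.get? body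
       else altScan body (min (PySem.Str.len body) MAX_LEN).toNat) := by
  by_cases h : V1_BARE_REMAP.contains body
  · rw [if_pos h, if_pos h]
  · rw [if_neg h, if_neg h]
    exact main_eq body

-- ===== VERDICT =====
theorem cell_to_model_spec : Claim_equal_cell_to_model := by
  intro cell_name _
  unfold Spec_cell_to_model cell_to_model cell_to_model_alt
  exact branch_eq _
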